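-- pv_equiv track=rewrite | github.com/joao-damorim/walk-tracking | markov_spark_calculo_ubidots/markov_spark_calculo_ubidots.py | localizacao_pessoa
-- ===== SOURCE A (Python) =====
-- def localizacao_pessoa(lista_pessoa):
--
--     localizacao = {}
--     localizacao['local_1'] = []
--     localizacao['local_2'] = []
--     localizacao['local_3'] = []
--     for pessoa in lista_pessoa:
--         if pessoa['local'] == 'local_1':
--             localizacao['local_1'].append(pessoa)
--         elif pessoa['local'] == 'local_2':
--             localizacao['local_2'].append(pessoa)
--         elif pessoa['local'] == 'local_3':
--             localizacao['local_3'].append(pessoa)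
--
--     return localizacao
-- ===== SOURCE B (Python) =====
-- def localizacao_pessoa(lista_pessoa):
--     return {k: [p for p in lista_pessoa if p['local'] == k]
--             for k in ('local_1', 'local_2', 'local_3')}
-- ===== Notes on version B (the rewrite author's own statement) =====
-- stated objective: idiomatic
-- what changed: Replaces the single pass with an if/elif chain mutating a pre-seeded dict by a dict comprehension that builds each of the three buckets with its own filtered scan of the list.
import Mathlib
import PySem

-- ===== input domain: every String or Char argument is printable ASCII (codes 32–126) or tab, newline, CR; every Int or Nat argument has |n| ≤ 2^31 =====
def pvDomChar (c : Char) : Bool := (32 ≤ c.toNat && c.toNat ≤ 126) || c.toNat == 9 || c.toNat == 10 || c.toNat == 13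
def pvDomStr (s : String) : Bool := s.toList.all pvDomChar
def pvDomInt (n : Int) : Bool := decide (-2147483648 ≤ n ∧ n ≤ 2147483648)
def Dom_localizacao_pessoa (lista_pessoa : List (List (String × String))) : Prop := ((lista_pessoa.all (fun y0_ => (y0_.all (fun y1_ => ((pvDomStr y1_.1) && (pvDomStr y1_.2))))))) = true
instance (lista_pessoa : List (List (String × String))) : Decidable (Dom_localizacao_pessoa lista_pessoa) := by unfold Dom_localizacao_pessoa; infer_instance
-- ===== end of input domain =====

-- B replaces A's single pass with an if/elif chain over a pre-seeded dict by a dict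
-- comprehension building each of the three buckets with its own filtered scan (idiomatic).

-- ===== PORT A =====
-- pessoa['local']: dict lookup (duplicate keys in the assoc list collapse Python-style via ofList)
def pvStepA (d : PySem.Dict String (List (List (String × String)))) (pessoa : List (String × String)) : PySem.Dict String (List (List (String × String))) :=
  match (PySem.Dict.ofList pessoa).get? "local" with
  | some l =>
    if l == "local_1" then d.modify "local_1" [] (· ++ [pessoa])
    else if l == "local_2" then d.modify "local_2" [] (· ++ [pessoa])
    else if l == "local_3" then d.modify "local_3" [] (· ++ [pessoa])
    else d
  | none => d  -- Python raises KeyError here; excluded by Pre_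

def localizacao_pessoa (lista_pessoa : List (List (String × String))) : List (String × List (List (String × String))) :=
  (lista_pessoa.foldl pvStepA
    (((PySem.Dict.empty.insert "local_1" []).insert "local_2" []).insert "local_3" [])).items

-- ===== PORT B =====
def localizacao_pessoa_alt (lista_pessoa : List (List (String × String))) : List (String × List (List (String × String))) :=
  ["local_1", "local_2", "local_3"].map
    (fun k => (k, lista_pessoa.filter (fun p => (PySem.Dict.ofList p).get? "local" == some k)))

-- ===== PRECONDITION & SPEC =====
-- Pre_ excludes exactly the inputs where some person dict lacks the 'local' key, on which A raises KeyError.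
def Pre_localizacao_pessoa (lista_pessoa : List (List (String × String))) : Prop :=
  (lista_pessoa.all (fun p => (PySem.Dict.ofList p).contains "local")) = true
instance (lista_pessoa : List (List (String × String))) : Decidable (Pre_localizacao_pessoa lista_pessoa) := by unfold Pre_localizacao_pessoa; infer_instance
def pvWitness_localizacao_pessoa : (List (List (String × String))) :=
  [[("local", "local_2"), ("nome", "ana")], [("local", "local_1")], [("local", "park")]]

def Spec_localizacao_pessoa (lista_pessoa : List (List (String × String))) (out : List (String × List (List (String × String)))) : Prop := out = localizacao_pessoa_alt lista_pessoa
instance (lista_pessoa : List (List (String × String))) (out : List (String × List (List (String × String)))) : Decidable (Spec_localizacao_pessoa lista_pessoa out) := by unfold Spec_localizacao_pessoa; infer_instance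

-- ===== CLAIM (what is proved, stated in full; the proofs are below) =====
def Claim_equal_localizacao_pessoa : Prop := ∀ (lista_pessoa : List (List (String × String))), Dom_localizacao_pessoa lista_pessoa → Pre_localizacao_pessoa lista_pessoa → Spec_localizacao_pessoa lista_pessoa (localizacao_pessoa lista_pessoa)

-- ===== LEMMAS AND PROOFS =====
def pvBucket (k : String) (l : List (List (String × String))) : List (List (String × String)) :=
  l.filter (fun p => (PySem.Dict.ofList p).get? "local" == some k)

theorem pvFoldA (l : List (List (String × String)))
    (h : (l.all (fun p => (PySem.Dict.ofList p).contains "local")) = true) :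
    ∀ a b c : List (List (String × String)),
      (l.foldl pvStepA (PySem.Dict.mk [("local_1", a), ("local_2", b), ("local_3", c)])).items
      = [("local_1", a ++ pvBucket "local_1" l), ("local_2", b ++ pvBucket "local_2" l),
         ("local_3", c ++ pvBucket "local_3" l)] := by
  induction l with
  | nil => intro a b c; simp [pvBucket]
  | cons p rest ih =>
    intro a b c
    simp only [List.all_cons, Bool.and_eq_true] at h
    obtain ⟨hp, hrest⟩ := h
    obtain ⟨lv, hlv⟩ : ∃ lv, (PySem.Dict.ofList p).get? "local" = some lv := by
      cases hg : (PySem.Dict.ofList p).get? "local" with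
      | none => rw [PySem.Dict.contains_eq_isSome_get?, hg] at hp; simp at hp
      | some v => exact ⟨v, rfl⟩
    simp only [List.foldl_cons, pvStepA, pvBucket, List.filter_cons, hlv]
    by_cases h1 : lv = "local_1"
    · subst h1
      simp only [beq_self_eq_true, if_true]
      rw [show (PySem.Dict.mk [("local_1", a), ("local_2", b), ("local_3", c)]).modify "local_1" [] (· ++ [p])
            = PySem.Dict.mk [("local_1", a ++ [p]), ("local_2", b), ("local_3", c)] from by
        simp [PySem.Dict.modify, PySem.Dict.getD_eq_get?_getD, PySem.Dict.get?_mk_cons,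
          PySem.Dict.ext_iff, PySem.Dict.items_insert, PySem.Dict.contains_mk]]
      rw [ih hrest]
      simp [pvBucket]
    · by_cases h2 : lv = "local_2"
      · subst h2
        simp only [show ("local_2" == "local_1") = false from rfl, beq_self_eq_true, if_true,
          Bool.false_eq_true, if_false]
        rw [show (PySem.Dict.mk [("local_1", a), ("local_2", b), ("local_3", c)]).modify "local_2" [] (· ++ [p])
              = PySem.Dict.mk [("local_1", a), ("local_2", b ++ [p]), ("local_3", c)] from by
          simp [PySem.Dict.modify, PySem.Dict.getD_eq_get?_getD, PySem.Dict.get?_mk_cons,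
          PySem.Dict.ext_iff, PySem.Dict.items_insert, PySem.Dict.contains_mk]]
        rw [ih hrest]
        simp [pvBucket]
      · by_cases h3 : lv = "local_3"
        · subst h3
          simp only [show ("local_3" == "local_1") = false from rfl,
            show ("local_3" == "local_2") = false from rfl, beq_self_eq_true, if_true,
            Bool.false_eq_true, if_false]
          rw [show (PySem.Dict.mk [("local_1", a), ("local_2", b), ("local_3", c)]).modify "local_3" [] (· ++ [p])
                = PySem.Dict.mk [("local_1", a), ("local_2", b), ("local_3", c ++ [p])] from by
            simp [PySem.Dict.modify, PySem.Dict.getD_eq_get?_getD, PySem.Dict.get?_mk_cons,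
          PySem.Dict.ext_iff, PySem.Dict.items_insert, PySem.Dict.contains_mk]]
          rw [ih hrest]
          simp [pvBucket]
        · have e1 : (lv == "local_1") = false := by simpa using h1
          have e2 : (lv == "local_2") = false := by simpa using h2
          have e3 : (lv == "local_3") = false := by simpa using h3
          simp only [e1, e2, e3, Bool.false_eq_true, if_false, Option.some.injEq,
            beq_iff_eq, h1, h2, h3]
          rw [ih hrest]
          simp [pvBucket]

-- ===== VERDICT (by name: the statement is the Claim_ definition above) =====
theorem localizacao_pessoa_spec : Claim_equal_localizacao_pessoa := by
  intro lista _ hpre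
  unfold Spec_localizacao_pessoa localizacao_pessoa localizacao_pessoa_alt
  have hseed : (((PySem.Dict.empty.insert "local_1" []).insert "local_2" []).insert "local_3" []
      : PySem.Dict String (List (List (String × String))))
      = PySem.Dict.mk [("local_1", []), ("local_2", []), ("local_3", [])] := by rfl
  rw [hseed, pvFoldA lista hpre]
  simp [pvBucket]
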